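-- pv_equiv track=rewrite | github.com/JayNamgung/PythonStudy | Programmers_240313.py | basic_day6_2
-- ===== SOURCE A (Python) =====
-- def basic_day6_2(n, control):
--     for idx,str in enumerate(control):
--         if str == "w":
--             n += 1
--         elif str == "s":
--             n -= 1
--         elif str == "d":
--             n += 10
--         elif str == "a":
--             n -= 10
--     return n
-- ===== SOURCE B (Python) =====
-- from collections import Counter
--
-- def basic_day6_2(n, control):
--     c = Counter(control)
--     return n + c['w'] - c['s'] + 10 * c['d'] - 10 * c['a']
-- ===== Notes on version B (the rewrite author's own statement) =====
-- stated objective: simpler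
-- what changed: Replaces the per-character if/elif accumulation loop with a Counter frequency table built once plus a single closed-form arithmetic expression n + c['w'] - c['s'] + 10*c['d'] - 10*c['a'].
import Mathlib
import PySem

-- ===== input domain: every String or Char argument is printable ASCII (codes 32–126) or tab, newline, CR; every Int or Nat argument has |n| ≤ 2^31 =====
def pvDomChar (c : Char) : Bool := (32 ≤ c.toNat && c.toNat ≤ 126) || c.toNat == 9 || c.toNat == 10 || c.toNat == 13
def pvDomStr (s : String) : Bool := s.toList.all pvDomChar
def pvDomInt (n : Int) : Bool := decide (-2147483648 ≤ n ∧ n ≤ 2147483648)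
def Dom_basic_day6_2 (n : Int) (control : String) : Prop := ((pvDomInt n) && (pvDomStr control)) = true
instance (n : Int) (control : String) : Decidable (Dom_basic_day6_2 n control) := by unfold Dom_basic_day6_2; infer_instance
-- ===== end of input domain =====

-- B replaces the per-character if/elif accumulation loop with a Counter frequency table
-- plus one closed-form arithmetic expression (objective: simpler).

-- ===== PORT A =====
-- for idx,str in enumerate(control): if/elif chain updating n
def basic_day6_2 (n : Int) (control : String) : Int :=
  (PySem.List.enumerate control.toList).foldl
    (fun n p =>
      if p.2 = 'w' then n + 1
      else if p.2 = 's' then n - 1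
      else if p.2 = 'd' then n + 10
      else if p.2 = 'a' then n - 10
      else n) n

-- ===== PORT B =====
-- c = Counter(control); return n + c['w'] - c['s'] + 10*c['d'] - 10*c['a']
def basic_day6_2_alt (n : Int) (control : String) : Int :=
  let c := PySem.Dict.counter control.toList
  n + c.getD 'w' 0 - c.getD 's' 0 + 10 * c.getD 'd' 0 - 10 * c.getD 'a' 0

-- ===== PRECONDITION & SPEC =====
def Spec_basic_day6_2 (n : Int) (control : String) (out : Int) : Prop := out = basic_day6_2_alt n control
instance (n : Int) (control : String) (out : Int) : Decidable (Spec_basic_day6_2 n control out) := by unfold Spec_basic_day6_2; infer_instance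

-- ===== CLAIM (what is proved, stated in full; the proofs are below) =====
def Claim_equal_basic_day6_2 : Prop := ∀ (n : Int) (control : String), Dom_basic_day6_2 n control → Spec_basic_day6_2 n control (basic_day6_2 n control)

-- ===== LEMMAS AND PROOFS =====

theorem basic_day6_2_foldl_enumerate (l : List Char) (s : Int) (n : Int) :
    (PySem.List.enumerate l s).foldl
      (fun n p =>
        if p.2 = 'w' then n + 1
        else if p.2 = 's' then n - 1
        else if p.2 = 'd' then n + 10
        else if p.2 = 'a' then n - 10
        else n) n
    = l.foldl
      (fun n c =>
        if c = 'w' then n + 1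
        else if c = 's' then n - 1
        else if c = 'd' then n + 10
        else if c = 'a' then n - 10
        else n) n := by
  induction l generalizing s n with
  | nil => simp [PySem.List.enumerate_nil]
  | cons c t ih => simp [PySem.List.enumerate_cons, ih]

theorem basic_day6_2_foldl_counts (l : List Char) (n : Int) :
    l.foldl
      (fun n c =>
        if c = 'w' then n + 1
        else if c = 's' then n - 1
        else if c = 'd' then n + 10
        else if c = 'a' then n - 10
        else n) n
    = n + l.count 'w' - l.count 's' + 10 * l.count 'd' - 10 * l.count 'a' := by
  induction l generalizing n with
  | nil => simp
  | cons c t ih =>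
    simp only [List.foldl_cons, ih, List.count_cons]
    by_cases hw : c = 'w' <;> by_cases hs : c = 's' <;> by_cases hd : c = 'd' <;>
      by_cases ha : c = 'a' <;> simp_all <;> push_cast <;> ring

-- ===== VERDICT (by name: the statement is the Claim_ definition above) =====
theorem basic_day6_2_spec : Claim_equal_basic_day6_2 := by
  intro n control _
  unfold Spec_basic_day6_2 basic_day6_2 basic_day6_2_alt
  rw [basic_day6_2_foldl_enumerate _ 0]
  simp only [PySem.Dict.getD_counter]
  exact basic_day6_2_foldl_counts _ _
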